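-- pv_equiv track=rewrite | github.com/tairanGao/practice | bringing-a-gun-to-a-guard-fight.py | get_mirror
-- ===== SOURCE A (Python) =====
-- def get_mirror(mirror, coordinates, dimensions_):
--     result = coordinates
--     mirror_rotation = [2 * coordinates, 2 * (dimensions_ - coordinates)]
--     if mirror < 0:
--         for i in range(mirror, 0):
--             result -= mirror_rotation[(i + 1) % 2]
--     else:
--         for i in range(mirror, 0, -1):
--             result += mirror_rotation[i % 2]
--     return result
-- ===== SOURCE B (Python) =====
-- def get_mirror(mirror, coordinates, dimensions_):
--     n = abs(mirror)
--     odd = (n + 1) // 2   # count of odd offsets among 1..n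
--     even = n // 2        # count of even offsets among 1..n
--     if mirror >= 0:
--         return coordinates + 2 * odd * (dimensions_ - coordinates) + 2 * even * coordinates
--     else:
--         return coordinates - 2 * odd * coordinates - 2 * even * (dimensions_ - coordinates)
-- ===== Notes on version B (the rewrite author's own statement) =====
-- stated objective: faster
-- what changed: Replaced the O(|mirror|) loop over alternating reflection terms by an O(1) closed form: count the odd and even steps among 1..|mirror| and multiply each count by its rotation term.
import Mathlib
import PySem

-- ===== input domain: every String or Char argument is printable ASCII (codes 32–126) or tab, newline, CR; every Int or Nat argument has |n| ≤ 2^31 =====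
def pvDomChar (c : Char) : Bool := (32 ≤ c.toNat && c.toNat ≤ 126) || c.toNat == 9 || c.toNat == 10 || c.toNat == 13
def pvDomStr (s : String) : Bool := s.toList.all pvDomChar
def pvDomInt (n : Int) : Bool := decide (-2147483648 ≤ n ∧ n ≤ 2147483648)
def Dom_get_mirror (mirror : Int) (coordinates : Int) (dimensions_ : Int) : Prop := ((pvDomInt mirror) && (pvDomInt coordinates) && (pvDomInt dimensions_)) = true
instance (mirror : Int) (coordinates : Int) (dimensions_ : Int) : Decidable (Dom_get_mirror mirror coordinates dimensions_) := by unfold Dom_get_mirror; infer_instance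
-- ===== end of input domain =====

-- B replaces A's O(|mirror|) reflection loop by an O(1) closed form counting odd/even steps.

-- ===== PORT A =====
def get_mirror (mirror : Int) (coordinates : Int) (dimensions_ : Int) : Int :=
  let mirror_rotation : List Int := [2 * coordinates, 2 * (dimensions_ - coordinates)]
  if mirror < 0 then
    (PySem.List.pyRange mirror 0 1).foldl
      (fun result i => result - PySem.List.pyGetD mirror_rotation (PySem.Int.mod (i + 1) 2) 0)
      coordinates
  else
    (PySem.List.pyRange mirror 0 (-1)).foldl
      (fun result i => result + PySem.List.pyGetD mirror_rotation (PySem.Int.mod i 2) 0)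
      coordinates

-- ===== PORT B =====
def get_mirror_alt (mirror : Int) (coordinates : Int) (dimensions_ : Int) : Int :=
  let n : Int := |mirror|
  let odd : Int := PySem.Int.floordiv (n + 1) 2
  let even : Int := PySem.Int.floordiv n 2
  if mirror ≥ 0 then
    coordinates + 2 * odd * (dimensions_ - coordinates) + 2 * even * coordinates
  else
    coordinates - 2 * odd * coordinates - 2 * even * (dimensions_ - coordinates)

-- ===== PRECONDITION & SPEC =====
def Spec_get_mirror (mirror : Int) (coordinates : Int) (dimensions_ : Int) (out : Int) : Prop := out = get_mirror_alt mirror coordinates dimensions_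
instance (mirror : Int) (coordinates : Int) (dimensions_ : Int) (out : Int) : Decidable (Spec_get_mirror mirror coordinates dimensions_ out) := by unfold Spec_get_mirror; infer_instance

-- ===== CLAIM (what is proved, stated in full; the proofs are below) =====
def Claim_equal_get_mirror : Prop := ∀ (mirror : Int) (coordinates : Int) (dimensions_ : Int), Dom_get_mirror mirror coordinates dimensions_ → Spec_get_mirror mirror coordinates dimensions_ (get_mirror mirror coordinates dimensions_)

-- ===== LEMMAS AND PROOFS =====

theorem pos_loop (c d : Int) (k : Nat) : ∀ acc : Int,
    (PySem.List.pyRange (k : Int) 0 (-1)).foldl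
      (fun result i => result + PySem.List.pyGetD [2 * c, 2 * (d - c)] (PySem.Int.mod i 2) 0) acc
    = acc + 2 * (((k + 1) / 2 : Nat) : Int) * (d - c) + 2 * ((k / 2 : Nat) : Int) * c := by
  induction k using Nat.twoStepInduction with
  | zero => intro acc; simp [PySem.List.pyRange_neg_one_eq_nil]
  | one =>
    intro acc
    rw [PySem.List.pyRange_neg_one_cons (by norm_num)]
    rw [PySem.List.pyRange_neg_one_eq_nil (by norm_num)]
    simp [PySem.Int.mod, PySem.List.pyGetD, PySem.List.pyGet?, PySem.List.pyIdx?]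

  | more k ih _ =>
    intro acc
    have h2 : ((k : Int) + 2) > 0 := by positivity
    rw [show ((k + 2 : Nat) : Int) = (k : Int) + 2 by push_cast; ring]
    rw [PySem.List.pyRange_neg_one_cons (by omega)]
    rw [show ((k : Int) + 2 - 1) = (k : Int) + 1 by ring]
    rw [PySem.List.pyRange_neg_one_cons (by omega)]
    rw [show ((k : Int) + 1 - 1) = (k : Int) by ring]
    simp only [List.foldl_cons]
    rw [ih]
    have hs1 : ((k + 2 + 1) / 2 : Nat) = ((k + 1) / 2 : Nat) + 1 := by omega
    have hs2 : ((k + 2) / 2 : Nat) = (k / 2 : Nat) + 1 := by omega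
    rw [hs1, hs2]
    push_cast
    rcases Nat.even_or_odd k with ⟨m, hm⟩ | ⟨m, hm⟩
    · subst hm
      have e1 : PySem.Int.mod ((m + m : Nat) + 2 : Int) 2 = 0 := by
        rw [PySem.Int.mod_eq_emod_of_pos (by norm_num)]; omega
      have e2 : PySem.Int.mod ((m + m : Nat) + 1 : Int) 2 = 1 := by
        rw [PySem.Int.mod_eq_emod_of_pos (by norm_num)]; omega
      rw [e1, e2]
      simp [PySem.List.pyGetD, PySem.List.pyGet?, PySem.List.pyIdx?]
      ring
    · subst hm
      have e1 : PySem.Int.mod ((2 * m + 1 : Nat) + 2 : Int) 2 = 1 := by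
        rw [PySem.Int.mod_eq_emod_of_pos (by norm_num)]; omega
      have e2 : PySem.Int.mod ((2 * m + 1 : Nat) + 1 : Int) 2 = 0 := by
        rw [PySem.Int.mod_eq_emod_of_pos (by norm_num)]; omega
      rw [e1, e2]
      simp [PySem.List.pyGetD, PySem.List.pyGet?, PySem.List.pyIdx?]
      ring

theorem neg_loop (c d : Int) (k : Nat) : ∀ acc : Int,
    (PySem.List.pyRange (-(k : Int)) 0 1).foldl
      (fun result i => result - PySem.List.pyGetD [2 * c, 2 * (d - c)] (PySem.Int.mod (i + 1) 2) 0) acc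
    = acc - 2 * (((k + 1) / 2 : Nat) : Int) * c - 2 * ((k / 2 : Nat) : Int) * (d - c) := by
  induction k using Nat.twoStepInduction with
  | zero => intro acc; simp [PySem.List.pyRange_one_eq_nil]
  | one =>
    intro acc
    rw [PySem.List.pyRange_one_cons (by norm_num)]
    rw [PySem.List.pyRange_one_eq_nil (by norm_num)]
    simp [PySem.Int.mod, PySem.List.pyGetD, PySem.List.pyGet?, PySem.List.pyIdx?]

  | more k ih _ =>
    intro acc
    rw [show (-((k + 2 : Nat) : Int)) = -((k : Int) + 2) by push_cast; ring]
    rw [PySem.List.pyRange_one_cons (by omega)]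
    rw [show (-((k : Int) + 2) + 1) = -((k : Int) + 1) by ring]
    rw [PySem.List.pyRange_one_cons (by omega)]
    rw [show (-((k : Int) + 1) + 1) = -(k : Int) by ring]
    simp only [List.foldl_cons]
    rw [ih]
    have hs1 : ((k + 2 + 1) / 2 : Nat) = ((k + 1) / 2 : Nat) + 1 := by omega
    have hs2 : ((k + 2) / 2 : Nat) = (k / 2 : Nat) + 1 := by omega
    rw [hs1, hs2]
    push_cast
    rcases Nat.even_or_odd k with ⟨m, hm⟩ | ⟨m, hm⟩
    · subst hm
      have e1 : PySem.Int.mod (-((m + m : Nat) + 2 : Int) + 1) 2 = 1 := by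
        rw [PySem.Int.mod_eq_emod_of_pos (by norm_num)]; omega
      have e2 : PySem.Int.mod (-((m + m : Nat) + 1 : Int) + 1) 2 = 0 := by
        rw [PySem.Int.mod_eq_emod_of_pos (by norm_num)]; omega
      rw [e1, e2]
      simp [PySem.List.pyGetD, PySem.List.pyGet?, PySem.List.pyIdx?]
      ring
    · subst hm
      have e1 : PySem.Int.mod (-((2 * m + 1 : Nat) + 2 : Int) + 1) 2 = 0 := by
        rw [PySem.Int.mod_eq_emod_of_pos (by norm_num)]; omega
      have e2 : PySem.Int.mod (-((2 * m + 1 : Nat) + 1 : Int) + 1) 2 = 1 := by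
        rw [PySem.Int.mod_eq_emod_of_pos (by norm_num)]; omega
      rw [e1, e2]
      simp [PySem.List.pyGetD, PySem.List.pyGet?, PySem.List.pyIdx?]
      ring

-- ===== VERDICT (by name: the statement is the Claim_ definition above) =====
theorem get_mirror_spec : Claim_equal_get_mirror := by
  intro mirror c d _
  unfold Spec_get_mirror get_mirror get_mirror_alt
  by_cases h : mirror < 0
  · simp only [if_pos h, if_neg (by omega : ¬ mirror ≥ 0)]
    have hk : mirror = -(mirror.natAbs : Int) := by omega
    rw [hk, neg_loop c d mirror.natAbs c]
    have habs : |(-(mirror.natAbs : Int))| = (mirror.natAbs : Int) := by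
      rw [abs_neg]; exact abs_of_nonneg (by positivity)
    rw [habs]
    have f1 : PySem.Int.floordiv ((mirror.natAbs : Int) + 1) 2 = (((mirror.natAbs + 1) / 2 : Nat) : Int) := by
      rw [show ((mirror.natAbs : Int) + 1) = ((mirror.natAbs + 1 : Nat) : Int) by push_cast; ring]
      exact_mod_cast PySem.Int.floordiv_natCast (mirror.natAbs + 1) 2
    have f2 : PySem.Int.floordiv (mirror.natAbs : Int) 2 = ((mirror.natAbs / 2 : Nat) : Int) := by
      exact_mod_cast PySem.Int.floordiv_natCast mirror.natAbs 2
    rw [f1, f2]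
  · simp only [if_neg h, if_pos (by omega : mirror ≥ 0)]
    have hk : mirror = (mirror.toNat : Int) := by omega
    rw [hk, pos_loop c d mirror.toNat c]
    have habs : |(mirror.toNat : Int)| = (mirror.toNat : Int) := abs_of_nonneg (by positivity)
    rw [habs]
    have f1 : PySem.Int.floordiv ((mirror.toNat : Int) + 1) 2 = (((mirror.toNat + 1) / 2 : Nat) : Int) := by
      rw [show ((mirror.toNat : Int) + 1) = ((mirror.toNat + 1 : Nat) : Int) by push_cast; ring]
      exact_mod_cast PySem.Int.floordiv_natCast (mirror.toNat + 1) 2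
    have f2 : PySem.Int.floordiv (mirror.toNat : Int) 2 = ((mirror.toNat / 2 : Nat) : Int) := by
      exact_mod_cast PySem.Int.floordiv_natCast mirror.toNat 2
    rw [f1, f2]
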